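-- pv_equiv track=rewrite | github.com/BislanAshinov/NaiveBayes | classifier_mnb.py | text_to_tokens
-- ===== SOURCE A (Python) =====
-- from typing import List, Any
-- from collections import defaultdict
--
-- def text_to_tokens(texts: List[str]):
--     tokenized_texts: List[dict] = []
--     for text in texts:
--         tokens_freq = defaultdict(int)
--         tokens = text.split()
--         length = len(tokens)
--         for i in range(length):
--             #tokens_freq[tokens[i]] += 1
--             if (i + 1 < length):
--                 bigram_token = tokens[i] + ' ' + tokens[i + 1]
--                 tokens_freq[bigram_token] += 1
--             if (i + 2 < length):
--                 threegram_token = tokens[i] + ' ' + tokens[i + 1] + ' ' + tokens[i + 2]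
--                 tokens_freq[threegram_token] += 1
--             #if (i + 3 < length):
--             #    fourgram_token = tokens[i] + ' ' + tokens[i + 1] + ' ' + tokens[i + 2] + ' ' + tokens[i + 3]
--             #    tokens_freq[fourgram_token] += 1
--         tokenized_texts.append(tokens_freq)
--
--     return tokenized_texts
-- ===== SOURCE B (Python) =====
-- from typing import List
-- from collections import defaultdict
--
--
-- def text_to_tokens(texts: List[str]):
--     # Decomposition: emit the n-gram key stream with a sliding window (no index
--     # arithmetic), then count the stream into a defaultdict in a second pass.
--     tokenized_texts = []
--     for text in texts:
--         tokens = text.split()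
--         keys = []
--         window = tokens
--         while len(window) >= 2:
--             bigram = window[0] + ' ' + window[1]
--             keys.append(bigram)
--             if len(window) >= 3:
--                 keys.append(bigram + ' ' + window[2])
--             window = window[1:]
--         tokens_freq = defaultdict(int)
--         for key in keys:
--             tokens_freq[key] += 1
--         tokenized_texts.append(tokens_freq)
--     return tokenized_texts
-- ===== Notes on version B (the rewrite author's own statement) =====
-- stated objective: idiomatic
-- what changed: Replaces the index loop with boundary guards by a sliding-window pass that emits the bigram/trigram key stream (no index arithmetic) followed by a separate counting pass over that stream.
import Mathlib
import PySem

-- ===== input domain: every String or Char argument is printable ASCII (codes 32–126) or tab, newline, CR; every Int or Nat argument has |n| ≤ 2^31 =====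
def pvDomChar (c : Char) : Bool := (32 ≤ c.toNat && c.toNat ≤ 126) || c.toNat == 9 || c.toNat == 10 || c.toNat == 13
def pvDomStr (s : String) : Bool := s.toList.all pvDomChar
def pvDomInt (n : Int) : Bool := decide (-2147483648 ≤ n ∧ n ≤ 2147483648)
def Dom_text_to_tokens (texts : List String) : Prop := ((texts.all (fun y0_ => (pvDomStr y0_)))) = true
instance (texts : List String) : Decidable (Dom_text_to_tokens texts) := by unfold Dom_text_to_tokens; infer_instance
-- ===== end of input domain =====

-- B replaces A's index loop with boundary guards by a sliding-window pass emitting the n-gram key stream, then a separate counting pass (idiomatic decomposition, same cost).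

-- ===== PORT A =====
def text_to_tokens (texts : List String) : List (List (String × Int)) :=
  texts.foldl (fun tokenized_texts text =>
    let tokens := PySem.Str.split₀ text
    let length : Int := tokens.length
    let tokens_freq :=
      (PySem.List.pyRange 0 length 1).foldl (fun d i =>
        let d := if i + 1 < length then
            d.modify (PySem.List.pyGetD tokens i "" ++ " " ++ PySem.List.pyGetD tokens (i + 1) "") 0 (· + 1)
          else d
        if i + 2 < length then
            d.modify (PySem.List.pyGetD tokens i "" ++ " " ++ PySem.List.pyGetD tokens (i + 1) "" ++ " " ++ PySem.List.pyGetD tokens (i + 2) "") 0 (· + 1)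
          else d) (PySem.Dict.empty : PySem.Dict String Int)
    tokenized_texts ++ [tokens_freq.items]) []

-- ===== PORT B =====
-- Source B's while-loop over the shrinking window, as structural recursion on the window
def altKeys : List String → List String
  | a :: b :: c :: rest =>
    (a ++ " " ++ b) :: ((a ++ " " ++ b) ++ " " ++ c) :: altKeys (b :: c :: rest)
  | [a, b] => [a ++ " " ++ b]
  | _ => []

def text_to_tokens_alt (texts : List String) : List (List (String × Int)) :=
  texts.map (fun text =>
    ((altKeys (PySem.Str.split₀ text)).foldl
      (fun d key => d.modify key 0 (· + 1)) (PySem.Dict.empty : PySem.Dict String Int)).items)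

-- ===== PRECONDITION & SPEC =====
def Spec_text_to_tokens (texts : List String) (out : List (List (String × Int))) : Prop := out = text_to_tokens_alt texts
instance (texts : List String) (out : List (List (String × Int))) : Decidable (Spec_text_to_tokens texts out) := by unfold Spec_text_to_tokens; infer_instance

-- ===== CLAIM (what is proved, stated in full; the proofs are below) =====
def Claim_equal_text_to_tokens : Prop := ∀ (texts : List String), Dom_text_to_tokens texts → Spec_text_to_tokens texts (text_to_tokens texts)

-- ===== LEMMAS AND PROOFS =====

-- A's key-emission sequence for one text, as a flatMap over the Nat index range
def aKeys (tokens : List String) : List String :=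
  (List.range tokens.length).flatMap (fun j =>
    (if j + 1 < tokens.length then [tokens.getD j "" ++ " " ++ tokens.getD (j + 1) ""] else []) ++
    (if j + 2 < tokens.length then [tokens.getD j "" ++ " " ++ tokens.getD (j + 1) "" ++ " " ++ tokens.getD (j + 2) ""] else []))

lemma aKeys_cons (a : String) (ts : List String) :
    aKeys (a :: ts) =
      ((if 0 < ts.length then [a ++ " " ++ ts.getD 0 ""] else []) ++
       (if 1 < ts.length then [a ++ " " ++ ts.getD 0 "" ++ " " ++ ts.getD 1 ""] else [])) ++ aKeys ts := by
  unfold aKeys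
  rw [List.length_cons, List.range_succ_eq_map, List.flatMap_cons, List.flatMap_map]
  congr 1
  · simp only [Nat.zero_add, Nat.succ_lt_succ_iff, List.getD_cons_succ, List.getD_cons_zero]
  · have hf : (fun (j : Nat) =>
        (if j.succ + 1 < ts.length + 1 then [(a :: ts).getD j.succ "" ++ " " ++ (a :: ts).getD (j.succ + 1) ""] else []) ++
        (if j.succ + 2 < ts.length + 1 then [(a :: ts).getD j.succ "" ++ " " ++ (a :: ts).getD (j.succ + 1) "" ++ " " ++ (a :: ts).getD (j.succ + 2) ""] else []))
        = (fun (j : Nat) =>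
        (if j + 1 < ts.length then [ts.getD j "" ++ " " ++ ts.getD (j + 1) ""] else []) ++
        (if j + 2 < ts.length then [ts.getD j "" ++ " " ++ ts.getD (j + 1) "" ++ " " ++ ts.getD (j + 2) ""] else [])) := by
      funext j
      have e1 : j.succ + 1 = (j + 1) + 1 := rfl
      have e2 : j.succ + 2 = (j + 2) + 1 := rfl
      simp only [Nat.succ_eq_add_one, e1, e2, List.getD_cons_succ, Nat.add_lt_add_iff_right]
    rw [hf]

lemma aKeys_eq_altKeys (tokens : List String) : aKeys tokens = altKeys tokens := by
  induction tokens using altKeys.induct with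
  | case1 a b c rest ih =>
      rw [aKeys_cons, ih]
      simp [altKeys]
  | case2 a b =>
      rw [aKeys_cons]
      simp [altKeys, aKeys]
  | case3 t h1 h2 =>
      match t with
      | [] => simp [aKeys, altKeys]
      | [a] => simp [aKeys, altKeys]
      | a :: b :: c :: r => exact absurd rfl (h1 a b c r)
      | [a, b] => exact absurd rfl (h2 a b)

lemma inner_fold_eq (tokens : List String) :
    (PySem.List.pyRange 0 (tokens.length : Int) 1).foldl (fun d i =>
        let d := if i + 1 < (tokens.length : Int) then
            d.modify (PySem.List.pyGetD tokens i "" ++ " " ++ PySem.List.pyGetD tokens (i + 1) "") 0 (· + 1)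
          else d
        if i + 2 < (tokens.length : Int) then
            d.modify (PySem.List.pyGetD tokens i "" ++ " " ++ PySem.List.pyGetD tokens (i + 1) "" ++ " " ++ PySem.List.pyGetD tokens (i + 2) "") 0 (· + 1)
          else d) (PySem.Dict.empty : PySem.Dict String Int)
    = (altKeys tokens).foldl (fun d key => d.modify key 0 (· + 1)) PySem.Dict.empty := by
  rw [← aKeys_eq_altKeys]
  unfold aKeys
  rw [List.foldl_flatMap]
  rw [PySem.List.pyRange_one]
  have hn : (((tokens.length : Int)) - 0).toNat = tokens.length := by omega
  rw [hn, List.foldl_map]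
  congr 1
  funext d j
  have g1 : ((j : Int) + 1) = ((j + 1 : Nat) : Int) := by push_cast; ring
  have g2 : ((j : Int) + 2) = ((j + 2 : Nat) : Int) := by push_cast; ring
  simp only [zero_add]
  rw [g2, g1]
  by_cases hc1 : j + 1 < tokens.length <;> by_cases hc2 : j + 2 < tokens.length <;>
    simp only [PySem.List.pyGetD_natCast, Nat.cast_lt, hc1, hc2, if_true, if_false,
      List.foldl_append, List.foldl_cons, List.foldl_nil]

-- ===== VERDICT (by name: the statement is the Claim_ definition above) =====
theorem text_to_tokens_spec : Claim_equal_text_to_tokens := by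
  intro texts _
  unfold Spec_text_to_tokens text_to_tokens text_to_tokens_alt
  rw [PySem.List.foldl_append_singleton_eq_map]
  simp only [inner_fold_eq, List.nil_append]
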